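-- pv_equiv track=rewrite | github.com/deniss619/two_factor_auth | sweater/routes.py | make_mass_for_coordinate
-- ===== SOURCE A (Python) =====
-- def make_mass_for_coordinate(coordinate, g):
--     res = []
--     counter = 0
--     for i in range(int(len(coordinate) / 2)):
--         buf = []
--         buf.append(coordinate[counter])
--         buf.append(coordinate[counter + 1])
--         counter += 2
--         res.append(buf)
--     if len(res)>g:
--         return res[g]
-- ===== SOURCE B (Python) =====
-- def make_mass_for_coordinate(coordinate, g):
--     # O(1): index the requested pair directly instead of building all pairs.
--     n = len(coordinate) // 2
--     if -n <= g < n: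
--         i = g if g >= 0 else g + n
--         return [coordinate[2 * i], coordinate[2 * i + 1]]
-- ===== Notes on version B (the rewrite author's own statement) =====
-- stated objective: faster
-- what changed: Instead of building the full list of all coordinate pairs and indexing it, B computes the pair count and reads the two requested elements directly by index (handling Python's negative indexing arithmetically).
import Mathlib
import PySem

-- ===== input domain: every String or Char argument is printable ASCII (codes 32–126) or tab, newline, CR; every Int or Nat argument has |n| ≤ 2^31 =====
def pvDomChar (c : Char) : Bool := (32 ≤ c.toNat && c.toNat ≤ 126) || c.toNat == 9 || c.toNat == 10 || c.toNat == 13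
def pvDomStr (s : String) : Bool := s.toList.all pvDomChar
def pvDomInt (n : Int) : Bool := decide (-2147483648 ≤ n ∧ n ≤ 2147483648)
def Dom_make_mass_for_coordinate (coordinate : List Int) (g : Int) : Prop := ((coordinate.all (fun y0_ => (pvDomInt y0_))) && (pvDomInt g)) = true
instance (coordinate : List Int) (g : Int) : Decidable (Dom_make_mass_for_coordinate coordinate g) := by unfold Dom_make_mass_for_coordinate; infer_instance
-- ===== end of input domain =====

-- B replaces A's O(n) pair-list construction by O(1) direct indexing of the requested pair (objective: faster).


-- ===== PORT A =====
-- Literal port of A: build res (all pairs) with a counter, then 'if len(res)>g: return res[g]'.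
-- In-loop reads coordinate[counter], coordinate[counter+1] are always in range (counter+1 ≤ 2*(len//2)-1 < len),
-- so pyGetD with default 0 is exact there; the final res[g] uses pyGet? (none = IndexError, excluded by Pre_).
def make_mass_for_coordinate (coordinate : List Int) (g : Int) : Option (List Int) :=
  let st := (PySem.List.pyRange 0 ((coordinate.length / 2 : Nat) : Int) 1).foldl
    (fun (st : List (List Int) × Int) _i =>
      let buf := [PySem.List.pyGetD coordinate st.2 0, PySem.List.pyGetD coordinate (st.2 + 1) 0]
      (st.1 ++ [buf], st.2 + 2))
    ([], 0)
  if (st.1.length : Int) > g then PySem.List.pyGet? st.1 g else none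

-- ===== PORT B =====
-- Port of B: pair count n = len//2; if -n ≤ g < n, normalise the index and read the two elements directly
-- (both reads are always in range when the branch is taken, so pyGetD with default 0 is exact).
def make_mass_for_coordinate_alt (coordinate : List Int) (g : Int) : Option (List Int) :=
  let n : Int := PySem.Int.floordiv (coordinate.length : Int) 2
  if -n ≤ g ∧ g < n then
    let i := if 0 ≤ g then g else g + n
    some [PySem.List.pyGetD coordinate (2 * i) 0, PySem.List.pyGetD coordinate (2 * i + 1) 0]
  else
    none

-- ===== PRECONDITION & SPEC =====
-- Pre_ excludes exactly the inputs where A raises IndexError: g < -(len(coordinate)//2), where res[g] is out of range.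
def Pre_make_mass_for_coordinate (coordinate : List Int) (g : Int) : Prop :=
  -((coordinate.length / 2 : Nat) : Int) ≤ g
instance (coordinate : List Int) (g : Int) : Decidable (Pre_make_mass_for_coordinate coordinate g) := by unfold Pre_make_mass_for_coordinate; infer_instance
def pvWitness_make_mass_for_coordinate : List Int × Int := ([1, 2, 3, 4], 1)

def Spec_make_mass_for_coordinate (coordinate : List Int) (g : Int) (out : Option (List Int)) : Prop := out = make_mass_for_coordinate_alt coordinate g
instance (coordinate : List Int) (g : Int) (out : Option (List Int)) : Decidable (Spec_make_mass_for_coordinate coordinate g out) := by unfold Spec_make_mass_for_coordinate; infer_instance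

-- ===== CLAIM (what is proved, stated in full; the proofs are below) =====
def Claim_equal_make_mass_for_coordinate : Prop := ∀ (coordinate : List Int) (g : Int), Dom_make_mass_for_coordinate coordinate g → Pre_make_mass_for_coordinate coordinate g → Spec_make_mass_for_coordinate coordinate g (make_mass_for_coordinate coordinate g)

-- ===== LEMMAS AND PROOFS =====

-- A's loop builds exactly the list of the first m pairs, with counter 2*m.
lemma loopA (c : List Int) (m : Nat) :
    (PySem.List.pyRange 0 (m : Int) 1).foldl
      (fun (st : List (List Int) × Int) _i =>
        (st.1 ++ [[PySem.List.pyGetD c st.2 0, PySem.List.pyGetD c (st.2 + 1) 0]], st.2 + 2))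
      ([], 0)
    = ((List.range m).map (fun (k : Nat) => [c.getD (2 * k) 0, c.getD (2 * k + 1) 0]),
       2 * (m : Int)) := by
  induction m with
  | zero => simp [PySem.List.pyRange_one_eq_nil]
  | succ m ih =>
    have hcast : ((m + 1 : Nat) : Int) = (m : Int) + 1 := by push_cast; ring
    rw [hcast, PySem.List.pyRange_one_succ_right (by positivity), List.foldl_append, ih]
    have e1 : (2 * (m : Int)) = ((2 * m : Nat) : Int) := by push_cast; ring
    have e2 : ((2 * m : Nat) : Int) + 1 = ((2 * m + 1 : Nat) : Int) := by push_cast; ring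
    simp only [List.foldl_cons, List.foldl_nil, e1, e2, PySem.List.pyGetD_natCast]
    refine Prod.ext ?_ ?_
    · simp [List.range_succ]
    · push_cast; ring

theorem make_mass_for_coordinate_spec : Claim_equal_make_mass_for_coordinate := by
  intro c g _dom hpre
  unfold Spec_make_mass_for_coordinate make_mass_for_coordinate make_mass_for_coordinate_alt
  unfold Pre_make_mass_for_coordinate at hpre
  set m : Nat := c.length / 2 with hm
  rw [loopA]
  have hn : PySem.Int.floordiv (c.length : Int) 2 = (m : Int) := by
    exact_mod_cast PySem.Int.floordiv_natCast c.length 2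
  simp only [hn, List.length_map, List.length_range]
  by_cases hg : g < (m : Int)
  · have hcond : (-(m : Int) ≤ g ∧ g < (m : Int)) := ⟨hpre, hg⟩
    rw [if_pos (by exact_mod_cast hg), if_pos hcond]
    by_cases hg0 : 0 ≤ g
    · -- nonnegative index
      obtain ⟨k, rfl⟩ : ∃ k : Nat, g = (k : Int) := ⟨g.toNat, by omega⟩
      have hlt : k < m := by exact_mod_cast hg
      rw [PySem.List.pyGet?_natCast, List.getElem?_map, List.getElem?_range hlt]
      have e1 : (2 * (k : Int)) = ((2 * k : Nat) : Int) := by push_cast; ring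
      have e2 : ((2 * k : Nat) : Int) + 1 = ((2 * k + 1 : Nat) : Int) := by push_cast; ring
      simp only [if_pos hg0, e1, e2, PySem.List.pyGetD_natCast, Option.map_some]
    · -- negative index g = -k
      obtain ⟨k, rfl⟩ : ∃ k : Nat, g = -(k : Int) := ⟨(-g).toNat, by omega⟩
      have hk1 : 0 < k := by omega
      have hkm : k ≤ m := by omega
      rw [if_neg hg0,
          PySem.List.pyGet?_neg_natCast _ _ hk1 (by simp; omega),
          List.length_map, List.length_range,
          List.getElem?_map, List.getElem?_range (by omega : m - k < m)]
      have e1 : (2 * (-(k : Int) + (m : Int))) = ((2 * (m - k) : Nat) : Int) := by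
        push_cast [Nat.sub_add_cancel, hkm]; ring
      have e2 : ((2 * (m - k) : Nat) : Int) + 1 = ((2 * (m - k) + 1 : Nat) : Int) := by
        push_cast; ring
      simp only [e1, e2, PySem.List.pyGetD_natCast, Option.map_some]
  · rw [if_neg (by exact_mod_cast hg), if_neg (by omega)]
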